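-- pv_equiv track=rewrite | github.com/egalli64/pythonesque | hr/algorithms/implementation/birthday_chocolate.py | solution
-- ===== SOURCE A (Python) =====
-- def solution(data, day, month):
--     result = 0
--
--     partial_sum = sum(data[:month])
--     if partial_sum == day:
--         result += 1
--     for i in range(0, len(data) - month):
--         partial_sum -= data[i]
--         partial_sum += data[i+month]
--         if partial_sum == day:
--             result += 1
--
--     return result
-- ===== SOURCE B (Python) =====
-- def solution(data, day, month):
--     prefix = [0]
--     for x in data:
--         prefix.append(prefix[-1] + x)
--     return sum(1 for i in range(len(data) - month + 1)
--                if prefix[i + month] - prefix[i] == day)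
-- ===== Notes on version B (the rewrite author's own statement) =====
-- stated objective: simpler
-- what changed: B replaces the incremental sliding-window update with a prefix-sum array and counts start indices whose window sum P[i+month]-P[i] equals day.
-- intended difference: When month > len(data) and sum(data) == day, A still counts the too-short prefix data[:month] as a window and returns 1, while B returns 0; B is intended since no window of length month exists. — e.g. on solution([1, 2], 3, 5): A returns 1, B returns 0
import Mathlib
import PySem

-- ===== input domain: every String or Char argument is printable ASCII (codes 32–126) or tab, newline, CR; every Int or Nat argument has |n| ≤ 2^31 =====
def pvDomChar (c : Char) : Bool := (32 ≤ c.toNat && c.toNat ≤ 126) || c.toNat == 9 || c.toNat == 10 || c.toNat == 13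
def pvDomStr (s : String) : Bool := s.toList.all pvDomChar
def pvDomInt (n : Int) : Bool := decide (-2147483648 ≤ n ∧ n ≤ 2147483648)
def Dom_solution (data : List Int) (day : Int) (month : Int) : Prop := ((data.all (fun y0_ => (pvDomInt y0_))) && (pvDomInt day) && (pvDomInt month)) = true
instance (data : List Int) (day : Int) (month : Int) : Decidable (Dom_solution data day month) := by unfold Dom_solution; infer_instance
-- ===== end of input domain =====

-- B counts windows via a prefix-sum array instead of A's incremental sliding-window update (objective: simpler).

-- ===== PORT A =====
-- sliding window; under Pre_ (0 ≤ month) every index in the loop is in range, so pyGetD's default is never used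
def solution (data : List Int) (day : Int) (month : Int) : Int :=
  let partial0 : Int := (PySem.List.slice data none (some month)).sum
  let result0 : Int := if partial0 = day then 1 else 0
  let st := (PySem.List.pyRange 0 ((data.length : Int) - month) 1).foldl
    (fun (s : Int × Int) i =>
      let ps := s.1 - PySem.List.pyGetD data i 0 + PySem.List.pyGetD data (i + month) 0
      (ps, if ps = day then s.2 + 1 else s.2))
    (partial0, result0)
  st.2

-- ===== PORT B =====
-- prefix-sum array, then count start indices whose window sum equals day
def solution_alt (data : List Int) (day : Int) (month : Int) : Int :=
  let pfx := data.foldl (fun acc x => acc ++ [PySem.List.pyGetD acc (-1) 0 + x]) [0]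
  ((PySem.List.pyRange 0 ((data.length : Int) - month + 1) 1).map
    (fun i => if PySem.List.pyGetD pfx (i + month) 0 - PySem.List.pyGetD pfx i 0 = day
              then (1 : Int) else 0)).sum

-- ===== PRECONDITION & SPEC =====
-- A raises IndexError whenever month < 0 (its loop then indexes past the end of data); Pre_ excludes exactly those inputs.
def Pre_solution (data : List Int) (day : Int) (month : Int) : Prop := 0 ≤ month
instance (data : List Int) (day : Int) (month : Int) : Decidable (Pre_solution data day month) := by unfold Pre_solution; infer_instance
def pvWitness_solution : List Int × Int × Int := ([1, 2, 1, 3, 2], 3, 2)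

-- When month > len(data) and sum(data) = day, A counts the too-short prefix data[:month] as a window and returns 1,
-- while B returns 0; B's value is intended since no window of length month exists.
def D_solution (data : List Int) (day : Int) (month : Int) : Prop :=
  (data.length : Int) < month ∧ data.sum = day
instance (data : List Int) (day : Int) (month : Int) : Decidable (D_solution data day month) := by unfold D_solution; infer_instance

def Spec_solution (data : List Int) (day : Int) (month : Int) (out : Int) : Prop :=
  ¬ D_solution data day month → out = solution_alt data day month
instance (data : List Int) (day : Int) (month : Int) (out : Int) : Decidable (Spec_solution data day month out) := by unfold Spec_solution; infer_instance

def pvDiffWitness_solution : List Int × Int × Int := ([1, 2], 3, 5)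
def pvDiffWitnessOut_solution : Int × Int := (1, 0)

-- ===== CLAIM (what is proved, stated in full; the proofs are below) =====
def Claim_unchanged_solution : Prop := ∀ (data : List Int) (day : Int) (month : Int), Dom_solution data day month → Pre_solution data day month → Spec_solution data day month (solution data day month)
def Claim_changed_solution : Prop := Dom_solution (pvDiffWitness_solution.1) (pvDiffWitness_solution.2.1) (pvDiffWitness_solution.2.2) ∧ Pre_solution (pvDiffWitness_solution.1) (pvDiffWitness_solution.2.1) (pvDiffWitness_solution.2.2) ∧ D_solution (pvDiffWitness_solution.1) (pvDiffWitness_solution.2.1) (pvDiffWitness_solution.2.2) ∧ solution (pvDiffWitness_solution.1) (pvDiffWitness_solution.2.1) (pvDiffWitness_solution.2.2) = pvDiffWitnessOut_solution.1 ∧ solution_alt (pvDiffWitness_solution.1) (pvDiffWitness_solution.2.1) (pvDiffWitness_solution.2.2) = pvDiffWitnessOut_solution.2 ∧ pvDiffWitnessOut_solution.1 ≠ pvDiffWitnessOut_solution.2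
def Claim_exact_solution : Prop := ∀ (data : List Int) (day : Int) (month : Int), Dom_solution data day month → Pre_solution data day month → D_solution data day month → solution data day month ≠ solution_alt data day month

-- ===== LEMMAS AND PROOFS =====

-- sum of the window of length m starting at i
def wsum (data : List Int) (m i : Nat) : Int := ((data.drop i).take m).sum
-- number of start indices i < k whose window sums to day
def wcnt (data : List Int) (day : Int) (m k : Nat) : Int :=
  ((List.range k).map (fun i => if wsum data m i = day then (1 : Int) else 0)).sum

lemma wsum_slide (data : List Int) (m i : Nat) (h : i + m < data.length) :
    wsum data m (i + 1) = wsum data m i - data.getD i 0 + data.getD (i + m) 0 := by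
  have h1 : i < data.length := by omega
  have e1 : (data.drop i).take (m + 1) = data[i] :: (data.drop (i + 1)).take m := by
    rw [List.drop_eq_getElem_cons h1, List.take_succ_cons]
  have e2 : (data.drop i).take (m + 1) = (data.drop i).take m ++ [data[i + m]] := by
    rw [List.take_add_one, List.getElem?_drop]
    simp [List.getElem?_eq_getElem h]
  have := congrArg List.sum (e1.symm.trans e2)
  simp only [List.sum_cons, List.sum_append, List.sum_cons, List.sum_nil] at this
  simp only [wsum, List.getD_eq_getElem data 0 h1, List.getD_eq_getElem data 0 h]
  omega

lemma wcnt_succ (data : List Int) (day : Int) (m k : Nat) :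
    wcnt data day m (k + 1) = wcnt data day m k + (if wsum data m k = day then (1 : Int) else 0) := by
  simp [wcnt, List.range_succ]

-- A's loop invariant: after the first j iterations the state is (window sum at j, count of hits among windows 0..j)
lemma loopA (data : List Int) (day : Int) (m : Nat) (j : Nat) (hj : j + m ≤ data.length) :
    (PySem.List.pyRange 0 (j : Int) 1).foldl
      (fun (s : Int × Int) i =>
        (s.1 - PySem.List.pyGetD data i 0 + PySem.List.pyGetD data (i + (m : Int)) 0,
         if s.1 - PySem.List.pyGetD data i 0 + PySem.List.pyGetD data (i + (m : Int)) 0 = day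
         then s.2 + 1 else s.2))
      (wsum data m 0, wcnt data day m 1)
    = (wsum data m j, wcnt data day m (j + 1)) := by
  induction j with
  | zero => simp [PySem.List.pyRange_one_eq_nil]
  | succ j ih =>
    have hj' : j + m ≤ data.length := by omega
    have hcast : ((j + 1 : Nat) : Int) = (j : Int) + 1 := by push_cast; ring
    rw [hcast, PySem.List.pyRange_one_succ_right (by positivity), List.foldl_append, ih hj']
    have hidx : ((j : Int) + (m : Int)) = ((j + m : Nat) : Int) := by push_cast; ring
    simp only [List.foldl_cons, List.foldl_nil, hidx, PySem.List.pyGetD_natCast]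
    have hs := wsum_slide data m j (by omega)
    have hps : wsum data m j - data.getD j 0 + data.getD (j + m) 0 = wsum data m (j + 1) := by
      rw [hs]
    rw [hps, wcnt_succ data day m (j + 1)]
    by_cases h : wsum data m (j + 1) = day <;> simp [h]

-- B's prefix list, with a general accumulator
lemma pref_gen (data : List Int) : ∀ (acc : List Int) (s : Int),
    data.foldl (fun a x => a ++ [PySem.List.pyGetD a (-1) 0 + x]) (acc ++ [s])
    = acc ++ [s] ++ (List.range data.length).map (fun i => s + (data.take (i + 1)).sum) := by
  induction data with
  | nil => intro acc s; simp
  | cons x xs ih =>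
    intro acc s
    simp only [List.foldl_cons, PySem.List.pyGetD_neg_one_append_singleton]
    rw [ih (acc ++ [s]) (s + x)]
    simp only [List.length_cons, List.range_succ_eq_map, List.map_cons, List.map_map,
      List.take_succ_cons, List.sum_cons, List.take_zero, List.sum_nil, List.append_assoc,
      List.cons_append, List.nil_append, add_zero]
    refine congrArg _ (congrArg _ (congrArg _ ?_))
    apply List.map_congr_left
    intro a _
    simp [Function.comp, add_assoc]

lemma pref_eq (data : List Int) :
    data.foldl (fun a x => a ++ [PySem.List.pyGetD a (-1) 0 + x]) [0]
    = (List.range (data.length + 1)).map (fun i => (data.take i).sum) := by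
  have h := pref_gen data [] 0
  simp only [List.nil_append] at h
  rw [h, List.range_succ_eq_map, List.map_cons, List.map_map]
  simp [Function.comp]

lemma pref_get (data : List Int) (j : Nat) (hj : j ≤ data.length) :
    PySem.List.pyGetD ((List.range (data.length + 1)).map (fun i => (data.take i).sum)) (j : Int) 0
    = (data.take j).sum := by
  rw [PySem.List.pyGetD_natCast, PySem.List.getD_map_range _ _ _ _ (by omega)]

lemma take_sub (data : List Int) (m i : Nat) :
    (data.take (i + m)).sum - (data.take i).sum = wsum data m i := by
  rw [List.take_add, List.sum_append, wsum]; ring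

-- B equals the window-hit count when month = m ≤ len
lemma altB (data : List Int) (day : Int) (m : Nat) (hm : m ≤ data.length) :
    solution_alt data day (m : Int) = wcnt data day m (data.length - m + 1) := by
  simp only [solution_alt, pref_eq]
  have hcast : ((data.length : Int) - (m : Int) + 1) = ((data.length - m + 1 : Nat) : Int) := by
    push_cast [hm]; ring
  rw [hcast, PySem.List.pyRange_zero_nat, List.map_map]
  unfold wcnt
  congr 1
  apply List.map_congr_left
  intro i hi
  have hi' : i < data.length - m + 1 := List.mem_range.mp hi
  have h1 : ((i : Int) + (m : Int)) = ((i + m : Nat) : Int) := by push_cast; ring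
  simp only [Function.comp, h1, pref_get data (i + m) (by omega), pref_get data i (by omega),
    take_sub]

-- A equals the window-hit count when month = m ≤ len
lemma solA (data : List Int) (day : Int) (m : Nat) (hm : m ≤ data.length) :
    solution data day (m : Int) = wcnt data day m (data.length - m + 1) := by
  simp only [solution, PySem.List.slice_to_natCast]
  have h0 : (data.take m).sum = wsum data m 0 := by simp [wsum]
  have hr : (if wsum data m 0 = day then (1 : Int) else 0) = wcnt data day m 1 := by
    simp [wcnt]
  have hcast : ((data.length : Int) - (m : Int)) = ((data.length - m : Nat) : Int) := by
    push_cast [hm]; ring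
  simp only [h0, hr, hcast]
  rw [loopA data day m (data.length - m) (by omega)]

theorem solution_spec : Claim_unchanged_solution := by
  intro data day month _ hpre hD
  unfold Pre_solution at hpre
  by_cases hm : month ≤ (data.length : Int)
  · -- month = (m : Nat) with m ≤ len
    obtain ⟨m, rfl⟩ : ∃ m : Nat, month = (m : Int) := ⟨month.toNat, (Int.toNat_of_nonneg hpre).symm⟩
    have hm' : m ≤ data.length := by exact_mod_cast hm
    rw [solA data day m hm', altB data day m hm']
  · -- month > len : A's loop and B's range are both empty; ¬D gives data.sum ≠ day
    rw [not_le] at hm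
    have hsum : data.sum ≠ day := by
      intro h; exact hD ⟨hm, h⟩
    have htake : data.take month.toNat = data := List.take_of_length_le (by omega)
    simp only [solution, solution_alt, PySem.List.slice_to data hpre, htake, if_neg hsum,
      PySem.List.pyRange_one_eq_nil (show (data.length : Int) - month ≤ 0 by omega),
      PySem.List.pyRange_one_eq_nil (show (data.length : Int) - month + 1 ≤ 0 by omega)]
    simp

-- ===== VERDICT =====
theorem solution_changed : Claim_changed_solution := by unfold Claim_changed_solution; decide

theorem solution_tight : Claim_exact_solution := by
  intro data day month _ hpre hD
  obtain ⟨hlen, hsum⟩ := hD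
  unfold Pre_solution at hpre
  have htake : data.take month.toNat = data := List.take_of_length_le (by omega)
  simp only [solution, solution_alt, PySem.List.slice_to data hpre, htake, if_pos hsum,
    PySem.List.pyRange_one_eq_nil (show (data.length : Int) - month ≤ 0 by omega),
    PySem.List.pyRange_one_eq_nil (show (data.length : Int) - month + 1 ≤ 0 by omega)]
  simp
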